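-- pv_equiv track=rewrite | github.com/jihacshnu/Litcoder-Contest-For-CS-Python | Module 3/Cookies.py | minStepsToTargetSweetness
-- ===== SOURCE A (Python) =====
-- def minStepsToTargetSweetness(target, candies):
--     candies.sort()
--     steps = 0
--     while candies[0] < target:
--         if len(candies) < 2:
--             return -1  # Not enough candies to reach target sweetness
--
--         least_sweet = candies.pop(0)
--         second_least_sweet = candies.pop(0)
--         new_sweetness = least_sweet + 2 * second_least_sweet
--         candies.insert(0, new_sweetness)
--         candies.sort()
--         steps += 1
--
--     return steps
-- ===== SOURCE B (Python) =====
-- import heapq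
--
-- def minStepsToTargetSweetness(target, candies):
--     # min-heap instead of repeated full sorts; does not mutate `candies` (A sorts/pops it in place)
--     heap = list(candies)
--     heapq.heapify(heap)
--     steps = 0
--     while heap[0] < target:
--         if len(heap) < 2:
--             return -1
--         a = heapq.heappop(heap)
--         b = heapq.heappop(heap)
--         heapq.heappush(heap, a + 2 * b)
--         steps += 1
--     return steps
-- ===== Notes on version B (the rewrite author's own statement) =====
-- stated objective: faster
-- what changed: Replaces A's loop that re-sorts the whole list after every combine (and pops from the front) with a heapq min-heap: heapify once, then pop the two smallest and push the combined sweetness each step; B also does not mutate the caller's list.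
import Mathlib
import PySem

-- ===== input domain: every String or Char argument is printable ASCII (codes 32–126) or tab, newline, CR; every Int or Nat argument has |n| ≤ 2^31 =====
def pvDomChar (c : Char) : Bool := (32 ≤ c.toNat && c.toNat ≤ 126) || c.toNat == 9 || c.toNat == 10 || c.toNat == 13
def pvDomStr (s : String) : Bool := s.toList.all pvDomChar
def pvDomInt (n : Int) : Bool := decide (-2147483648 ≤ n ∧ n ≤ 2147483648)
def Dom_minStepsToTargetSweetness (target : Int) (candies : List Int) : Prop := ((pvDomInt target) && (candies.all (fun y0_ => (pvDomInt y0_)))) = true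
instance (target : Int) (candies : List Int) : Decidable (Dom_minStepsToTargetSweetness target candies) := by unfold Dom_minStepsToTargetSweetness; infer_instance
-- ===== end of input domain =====

-- B replaces A's re-sort-the-whole-list-each-step loop by a min-heap (pop two smallest, push
-- combined); equal return value; note A sorts/pops `candies` in place while B leaves it unchanged.

-- ===== PORT A =====
-- A's loop: while candies[0] < target, pop the two smallest, insert least + 2*second, re-sort.
def minStepsLoopA (target : Int) (l : List Int) (steps : Int) : Int :=
  match l with
  | [] => -1  -- candies[0] raises IndexError here (excluded by Pre_)
  | c0 :: rest =>
    if c0 < target then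
      match rest with
      | [] => -1  -- len(candies) < 2
      | c1 :: t =>
        minStepsLoopA target (PySem.List.sorted ((c0 + 2 * c1) :: t) (fun x => x) false) (steps + 1)
    else steps
termination_by l.length
decreasing_by simp [PySem.List.length_sorted]

def minStepsToTargetSweetness (target : Int) (candies : List Int) : Int :=
  minStepsLoopA target (PySem.List.sorted candies (fun x => x) false) 0

-- ===== PORT B =====
-- heapq is ported at the level of its contract on values: heap[0] is the minimum value,
-- heappop removes one occurrence of the minimum, heappush adds an element (exact for the
-- integer RESULT of Source B, which depends only on the multiset held by the heap).
theorem removeB_length {xs r : List Int} {v : Int} (h : PySem.List.remove? xs v = some r) :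
    r.length + 1 = xs.length := by
  simp [PySem.List.remove?] at h
  rcases h with ⟨i, hi, he⟩
  have hlt : i < xs.length := (List.idxOf?_eq_some_iff.mp hi).1
  rw [← he, List.length_eraseIdx, if_pos hlt]
  omega

def minStepsLoopB (target : Int) (heap : List Int) (steps : Int) : Int :=
  match hm : PySem.List.min? heap (fun x => x) with
  | none => -1  -- heap[0] raises IndexError here (excluded by Pre_)
  | some a =>
    if a < target then
      if heap.length < 2 then -1
      else
        match h1m : PySem.List.remove? heap a with
        | none => -1  -- unreachable: the minimum is a member
        | some h1 =>
          match PySem.List.min? h1 (fun x => x) with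
          | none => -1  -- unreachable: len ≥ 2
          | some b =>
            match h2r : PySem.List.remove? h1 b with
            | none => -1  -- unreachable
            | some h2 => minStepsLoopB target ((a + 2 * b) :: h2) (steps + 1)
    else steps
termination_by heap.length
decreasing_by
  have e1 := removeB_length h1m
  have e2 := removeB_length h2r
  simp; omega

def minStepsToTargetSweetness_alt (target : Int) (candies : List Int) : Int :=
  minStepsLoopB target candies 0

-- ===== PRECONDITION & SPEC =====
-- Pre_ excludes only the empty list, on which Python A raises IndexError (candies[0]).
def Pre_minStepsToTargetSweetness (target : Int) (candies : List Int) : Prop := candies ≠ []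
instance (target : Int) (candies : List Int) : Decidable (Pre_minStepsToTargetSweetness target candies) := by unfold Pre_minStepsToTargetSweetness; infer_instance
def pvWitness_minStepsToTargetSweetness : Int × List Int := (5, [1, 2, 3])

def Spec_minStepsToTargetSweetness (target : Int) (candies : List Int) (out : Int) : Prop := out = minStepsToTargetSweetness_alt target candies
instance (target : Int) (candies : List Int) (out : Int) : Decidable (Spec_minStepsToTargetSweetness target candies out) := by unfold Spec_minStepsToTargetSweetness; infer_instance

-- ===== CLAIM (what is proved, stated in full; the proofs are below) =====
def Claim_equal_minStepsToTargetSweetness : Prop := ∀ (target : Int) (candies : List Int), Dom_minStepsToTargetSweetness target candies → Pre_minStepsToTargetSweetness target candies → Spec_minStepsToTargetSweetness target candies (minStepsToTargetSweetness target candies)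

-- ===== LEMMAS AND PROOFS =====

-- equation lemmas for minStepsLoopB (its matches carry named hypotheses, so we split)
lemma loopB_done {target : Int} {heap : List Int} {a steps : Int}
    (hm : PySem.List.min? heap (fun x => x) = some a) (hlt : ¬ a < target) :
    minStepsLoopB target heap steps = steps := by
  rw [minStepsLoopB.eq_def]
  split <;> simp_all

lemma loopB_short {target : Int} {heap : List Int} {a steps : Int}
    (hm : PySem.List.min? heap (fun x => x) = some a) (hlt : a < target)
    (hlen : heap.length < 2) :
    minStepsLoopB target heap steps = -1 := by
  rw [minStepsLoopB.eq_def]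
  split <;> simp_all

lemma loopB_step {target : Int} {heap h1 h2 : List Int} {a b steps : Int}
    (hm : PySem.List.min? heap (fun x => x) = some a) (hlt : a < target)
    (hlen : ¬ heap.length < 2)
    (hr : PySem.List.remove? heap a = some h1)
    (hm1 : PySem.List.min? h1 (fun x => x) = some b)
    (hr1 : PySem.List.remove? h1 b = some h2) :
    minStepsLoopB target heap steps = minStepsLoopB target ((a + 2 * b) :: h2) (steps + 1) := by
  rw [minStepsLoopB.eq_def]
  split
  · simp_all
  · rename_i a' hm'
    rw [hm] at hm'; cases hm'
    rw [if_pos hlt, if_neg hlen]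
    split
    · simp_all
    · rename_i h1' hr'
      rw [hr] at hr'; cases hr'
      split
      · simp_all
      · rename_i b' hm1'
        rw [hm1] at hm1'; cases hm1'
        split
        · simp_all
        · rename_i h2' hr1'
          rw [hr1] at hr1'; cases hr1'; rfl

-- on a sorted list, the head is the first minimal element of any permutation
lemma min?_of_perm_sorted {c0 : Int} {rest h : List Int}
    (hp : (c0 :: rest).Perm h) (hs : (c0 :: rest).Pairwise (· ≤ ·)) :
    ∃ r, PySem.List.min? h (fun x => x) = some c0 ∧ PySem.List.remove? h c0 = some r ∧ rest.Perm r := by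
  have hc0h : c0 ∈ h := hp.mem_iff.mp (by simp)
  cases hm : PySem.List.min? h (fun x => x) with
  | none => rw [PySem.List.min?_eq_none_iff] at hm; simp [hm] at hc0h
  | some m =>
    have hmh : m ∈ h := PySem.List.min?_mem hm
    have hmin := PySem.List.min?_isMin hm
    have hm_le : m ≤ c0 := hmin c0 hc0h
    have hc0_le : c0 ≤ m := by
      have hml : m ∈ c0 :: rest := hp.mem_iff.mpr hmh
      rcases hml with _ | hml
      · exact le_refl _
      · exact (List.pairwise_cons.mp hs).1 m (by assumption)
    have hmc0 : m = c0 := le_antisymm hm_le hc0_le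
    subst hmc0
    refine ⟨h.erase m, ?_, ?_, ?_⟩
    · rfl
    · exact PySem.List.remove?_eq_some_erase h m hc0h
    · have h1 : (h.erase m).Perm ((m :: rest).erase m) := hp.symm.erase m
      simpa using h1.symm

lemma loopAB (target : Int) : ∀ (n : Nat) (l h : List Int) (steps : Int),
    l.Perm h → l.Pairwise (· ≤ ·) → l.length = n →
    minStepsLoopA target l steps = minStepsLoopB target h steps := by
  intro n
  induction n with
  | zero =>
    intro l h steps hp hs hl
    have hl0 : l = [] := List.length_eq_zero_iff.mp hl
    subst hl0
    have hh : h = [] := hp.nil_eq.symm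
    subst hh
    rw [minStepsLoopA.eq_def, minStepsLoopB.eq_def]
    split <;> simp_all [PySem.List.min?]
  | succ n ih =>
    intro l h steps hp hs hl
    match l with
    | [] => simp at hl
    | c0 :: rest =>
      obtain ⟨h1, hm, hr, hp1⟩ := min?_of_perm_sorted hp hs
      by_cases hlt : c0 < target
      · have hlen : h.length = n + 1 := by rw [← hp.length_eq, hl]
        match rest with
        | [] =>
          have hsh : h.length < 2 := by
            have h1l : (c0 :: ([] : List Int)).length = h.length := hp.length_eq
            simp at h1l; omega
          rw [minStepsLoopA.eq_def]
          simp only [if_pos hlt]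
          rw [loopB_short hm hlt hsh]
        | c1 :: t =>
          have hlen2 : ¬ h.length < 2 := by
            have h2l : (c0 :: c1 :: t).length = h.length := hp.length_eq
            simp at h2l; omega
          have hs1 : (c1 :: t).Pairwise (· ≤ ·) := (List.pairwise_cons.mp hs).2
          obtain ⟨h2, hm1, hr1, hp2⟩ := min?_of_perm_sorted hp1 hs1
          rw [minStepsLoopA.eq_def]
          simp only [if_pos hlt]
          rw [loopB_step hm hlt hlen2 hr hm1 hr1]
          have hperm : (PySem.List.sorted ((c0 + 2 * c1) :: t) (fun x => x) false).Perm
              ((c0 + 2 * c1) :: h2) :=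
            (PySem.List.sorted_perm _ _ _).trans (List.Perm.cons _ hp2)
          refine ih _ _ (steps + 1) hperm (PySem.List.sorted_pairwise _ _) ?_
          rw [PySem.List.length_sorted]
          simp at hl ⊢; omega
      · rw [minStepsLoopA.eq_def]
        simp only [if_neg hlt]
        rw [loopB_done hm hlt]

-- ===== VERDICT (by name: the statement is the Claim_ definition above) =====
theorem minStepsToTargetSweetness_spec : Claim_equal_minStepsToTargetSweetness := by
  intro target candies _ hpre
  unfold Spec_minStepsToTargetSweetness minStepsToTargetSweetness minStepsToTargetSweetness_alt
  exact loopAB target candies.length (PySem.List.sorted candies (fun x => x) false) candies 0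
    (PySem.List.sorted_perm _ _ _) (PySem.List.sorted_pairwise _ _)
    (PySem.List.length_sorted _ _ _)
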